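-- pv_equiv track=rewrite | github.com/dhruvvvijay/ROAR_PY | roar_py_interface/actors/actor.py | __propose_name_and_modify_dict
-- ===== SOURCE A (Python) =====
-- def __propose_name_and_modify_dict(diction: dict, new_name: str, counter: int = 0):
--     if counter < 1:
--         if new_name + "_1" in diction:
--             return __propose_name_and_modify_dict(diction, new_name, 2)
--         else:
--             diction[new_name + "_1"] = diction[new_name]
--             diction.pop(new_name)
--             return __propose_name_and_modify_dict(diction, new_name, 2)
--     else:
--         actual_name = new_name + "_" + str(counter)
--         if actual_name in diction:
--             return __propose_name_and_modify_dict(diction, new_name, counter + 1)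
--         else:
--             return actual_name
-- ===== SOURCE B (Python) =====
-- def __propose_name_and_modify_dict(diction: dict, new_name: str, counter: int = 0):
--     # Different decomposition: do the one-time "_1" rename, then pick the first free
--     # suffix by scanning a pigeonhole-bounded candidate range against a key set,
--     # instead of unbounded recursion probing the dict one counter at a time.
--     if counter < 1:
--         if new_name + "_1" not in diction:
--             diction[new_name + "_1"] = diction[new_name]
--             diction.pop(new_name)
--         counter = 2
--     keys = set(diction)
--     for k in range(counter, counter + len(diction) + 1):
--         candidate = new_name + "_" + str(k)
--         if candidate not in keys:
--             return candidate
-- ===== Notes on version B (the rewrite author's own statement) =====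
-- stated objective: alternative
-- what changed: B replaces A's unbounded recursion that probes the dict one counter at a time with a single pass: after the one-time '_1' rename it builds the key set once and scans the pigeonhole-bounded candidate range range(start, start+len+1) for the first free suffix.
import Mathlib
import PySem

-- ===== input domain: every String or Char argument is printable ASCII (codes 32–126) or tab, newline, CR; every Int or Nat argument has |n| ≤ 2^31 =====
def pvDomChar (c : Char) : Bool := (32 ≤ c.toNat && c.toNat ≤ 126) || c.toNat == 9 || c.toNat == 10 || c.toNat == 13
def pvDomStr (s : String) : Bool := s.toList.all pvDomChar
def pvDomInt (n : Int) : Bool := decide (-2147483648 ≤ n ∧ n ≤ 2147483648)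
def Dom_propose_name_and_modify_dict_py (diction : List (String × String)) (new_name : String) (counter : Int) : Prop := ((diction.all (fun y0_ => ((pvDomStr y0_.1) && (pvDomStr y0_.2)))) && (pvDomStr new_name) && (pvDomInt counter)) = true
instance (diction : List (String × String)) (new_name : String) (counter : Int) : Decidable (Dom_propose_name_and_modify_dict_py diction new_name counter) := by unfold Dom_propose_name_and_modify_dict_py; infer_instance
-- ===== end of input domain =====

-- B replaces A's unbounded recursion (one dict probe per counter value) with one bounded scan of a
-- pigeonhole-sized candidate range against a key set built once; equivalence is about the RETURN value
-- (both programs mutate the dict identically: the one-time '_1' rename).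

-- ===== PORT A =====
-- A's recursion, with a fuel argument as a totality guard only (the top level passes enough fuel:
-- at most d.size suffixes can be taken, so the scan ends within d.size+1 probes).
def pyA_loop (d : PySem.Dict String String) (new_name : String) (counter : Int) : Nat → String
  | 0 => ""
  | fuel + 1 =>
    if counter < 1 then
      if d.contains (new_name ++ "_1") then
        pyA_loop d new_name 2 fuel
      else
        pyA_loop ((d.insert (new_name ++ "_1") (d.getD new_name "")).erase new_name) new_name 2 fuel
    else
      let actual_name := new_name ++ "_" ++ PySem.Int.toStr counter
      if d.contains actual_name then pyA_loop d new_name (counter + 1) fuel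
      else actual_name

def propose_name_and_modify_dict_py (diction : List (String × String)) (new_name : String) (counter : Int) : String :=
  let d := PySem.Dict.ofList diction
  pyA_loop d new_name counter (d.size + 4)

-- ===== PORT B =====
def propose_name_and_modify_dict_py_alt (diction : List (String × String)) (new_name : String) (counter : Int) : String :=
  let d0 := PySem.Dict.ofList diction
  -- one-time '_1' rename (same side effect as A), then start the scan at 2
  let d : PySem.Dict String String :=
    if counter < 1 then
      (if d0.contains (new_name ++ "_1") then d0
       else (d0.insert (new_name ++ "_1") (d0.getD new_name "")).erase new_name)
    else d0
  let start : Int := if counter < 1 then 2 else counter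
  let keys : PySem.Set String := PySem.Set.ofList d.keys     -- keys = set(diction)
  -- for k in range(start, start + len(diction) + 1): return the first free candidate
  match (PySem.List.pyRange start (start + (d.size : Int) + 1) 1).find?
      (fun k => !(keys.contains (new_name ++ "_" ++ PySem.Int.toStr k))) with
  | some k => new_name ++ "_" ++ PySem.Int.toStr k
  | none => ""

-- ===== PRECONDITION & SPEC =====
-- Pre_ excludes exactly the inputs where Python A raises KeyError: counter < 1 while neither
-- new_name+"_1" nor new_name is a key (diction[new_name] fails).
def Pre_propose_name_and_modify_dict_py (diction : List (String × String)) (new_name : String) (counter : Int) : Prop :=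
  counter < 1 → ((new_name ++ "_1") ∈ diction.map Prod.fst ∨ new_name ∈ diction.map Prod.fst)
instance (diction : List (String × String)) (new_name : String) (counter : Int) : Decidable (Pre_propose_name_and_modify_dict_py diction new_name counter) := by unfold Pre_propose_name_and_modify_dict_py; infer_instance

def pvWitness_propose_name_and_modify_dict_py : (List (String × String)) × String × Int := ([("a", "x")], "a", 1)

def Spec_propose_name_and_modify_dict_py (diction : List (String × String)) (new_name : String) (counter : Int) (out : String) : Prop := out = propose_name_and_modify_dict_py_alt diction new_name counter
instance (diction : List (String × String)) (new_name : String) (counter : Int) (out : String) : Decidable (Spec_propose_name_and_modify_dict_py diction new_name counter out) := by unfold Spec_propose_name_and_modify_dict_py; infer_instance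

-- ===== CLAIM (what is proved, stated in full; the proofs are below) =====
def Claim_equal_propose_name_and_modify_dict_py : Prop := ∀ (diction : List (String × String)) (new_name : String) (counter : Int), Dom_propose_name_and_modify_dict_py diction new_name counter → Pre_propose_name_and_modify_dict_py diction new_name counter → Spec_propose_name_and_modify_dict_py diction new_name counter (propose_name_and_modify_dict_py diction new_name counter)

-- ===== LEMMAS AND PROOFS =====

-- ---- str(n) is injective on the nonnegative integers (decimal decode of Nat.toDigits) ----
def pvDec (l : List Char) : Nat := l.foldl (fun a c => 10 * a + (c.toNat - 48)) 0

theorem pv_tdc_append (f : Nat) : ∀ (n : Nat) (l : List Char),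
    Nat.toDigitsCore 10 f n l = Nat.toDigitsCore 10 f n [] ++ l := by
  induction f with
  | zero => intro n l; simp [Nat.toDigitsCore]
  | succ f ih =>
    intro n l
    simp only [Nat.toDigitsCore]
    by_cases h : n / 10 = 0
    · simp [h]
    · simp only [h, if_false]
      rw [ih (n / 10) (Nat.digitChar (n % 10) :: l), ih (n / 10) [Nat.digitChar (n % 10)]]
      simp

theorem pv_tdc_fuel (f : Nat) : ∀ (f' n : Nat), n < f → n < f' →
    Nat.toDigitsCore 10 f n [] = Nat.toDigitsCore 10 f' n [] := by
  induction f with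
  | zero => intro f' n h; omega
  | succ f ih =>
    intro f' n h h'
    cases f' with
    | zero => omega
    | succ f' =>
      simp only [Nat.toDigitsCore]
      by_cases h0 : n / 10 = 0
      · simp [h0]
      · simp only [h0, if_false]
        have hlt : n / 10 < n := Nat.div_lt_self (by omega) (by omega)
        rw [pv_tdc_append f, pv_tdc_append f']
        rw [ih f' (n / 10) (by omega) (by omega)]

theorem pv_toDigits_lt {n : Nat} (h : n < 10) : Nat.toDigits 10 n = [Nat.digitChar n] := by
  simp [Nat.toDigits, Nat.toDigitsCore, Nat.div_eq_of_lt h, Nat.mod_eq_of_lt h]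

theorem pv_toDigits_ge {n : Nat} (h : 10 ≤ n) :
    Nat.toDigits 10 n = Nat.toDigits 10 (n / 10) ++ [Nat.digitChar (n % 10)] := by
  have h0 : n / 10 ≠ 0 := by omega
  simp only [Nat.toDigits, Nat.toDigitsCore, h0, if_false]
  rw [pv_tdc_append n]
  congr 1
  exact pv_tdc_fuel n (n / 10 + 1) (n / 10) (Nat.div_lt_self (by omega) (by omega)) (by omega)

theorem pv_digitChar_val {m : Nat} (h : m < 10) : (Nat.digitChar m).toNat - 48 = m := by
  interval_cases m <;> decide

theorem pv_dec_toDigits (n : Nat) : pvDec (Nat.toDigits 10 n) = n := by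
  induction n using Nat.strong_induction_on with
  | _ n ih =>
    by_cases h : n < 10
    · rw [pv_toDigits_lt h]
      simp [pvDec, pv_digitChar_val h]
    · rw [pv_toDigits_ge (by omega)]
      have hrec := ih (n / 10) (Nat.div_lt_self (by omega) (by omega))
      simp only [pvDec, List.foldl_append, List.foldl_cons, List.foldl_nil] at hrec ⊢
      rw [hrec, pv_digitChar_val (Nat.mod_lt _ (by omega))]
      omega

theorem pv_toStr_inj {n m : Int} (hn : 0 ≤ n) (hm : 0 ≤ m)
    (h : PySem.Int.toStr n = PySem.Int.toStr m) : n = m := by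
  have h2 : PySem.Int.toChars n = PySem.Int.toChars m := by
    rw [← PySem.Int.toList_toStr, ← PySem.Int.toList_toStr, h]
  simp only [PySem.Int.toChars, if_neg (by omega : ¬ n < 0), if_neg (by omega : ¬ m < 0)] at h2
  have := congrArg pvDec h2
  rw [pv_dec_toDigits, pv_dec_toDigits] at this
  omega

-- candidate name for suffix k
def pvKey (new_name : String) (k : Int) : String := new_name ++ "_" ++ PySem.Int.toStr k

theorem pvKey_inj {new_name : String} {k k' : Int} (hk : 0 ≤ k) (hk' : 0 ≤ k')
    (h : pvKey new_name k = pvKey new_name k') : k = k' := by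
  unfold pvKey at h
  exact pv_toStr_inj hk hk' ((String.append_right_inj (new_name ++ "_")).mp h)

-- nodup + subset bounds length
theorem pv_nodup_subset_length {l l' : List String} (h : l.Nodup) (hs : l ⊆ l') :
    l.length ≤ l'.length :=
  calc l.length = l.toFinset.card := (List.toFinset_card_of_nodup h).symm
    _ ≤ l'.toFinset.card := Finset.card_le_card (by intro x hx; simp at hx ⊢; exact hs hx)
    _ ≤ l'.length := l'.toFinset_card_le

-- pigeonhole: among d.size + 1 candidates some key is free
theorem pv_exists_free (d : PySem.Dict String String) (new_name : String) {c : Int} (hc : 1 ≤ c) :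
    ∃ k ∈ PySem.List.pyRange c (c + (d.size : Int) + 1) 1, d.contains (pvKey new_name k) = false := by
  by_contra hall
  have hall' : ∀ k ∈ PySem.List.pyRange c (c + (d.size : Int) + 1) 1,
      pvKey new_name k ∈ d.keys := by
    intro k hk
    cases hcc : d.contains (pvKey new_name k) with
    | false => exact absurd ⟨k, hk, hcc⟩ hall
    | true => exact (PySem.Dict.contains_iff_mem_keys _ _).mp hcc
  have hnodup : ((PySem.List.pyRange c (c + (d.size : Int) + 1) 1).map (pvKey new_name)).Nodup := by
    refine List.Nodup.map_on ?_ (PySem.List.nodup_pyRange_one c _)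
    intro x hx y hy hxy
    rw [PySem.List.mem_pyRange_one] at hx hy
    exact pvKey_inj (by omega) (by omega) hxy
  have hsub : ((PySem.List.pyRange c (c + (d.size : Int) + 1) 1).map (pvKey new_name)) ⊆ d.keys := by
    intro s hs
    rcases List.mem_map.mp hs with ⟨k, hk, rfl⟩
    exact hall' k hk
  have hlen := pv_nodup_subset_length hnodup hsub
  have hklen : d.keys.length = d.size := by
    simp [PySem.Dict.keys, PySem.Dict.size]
  rw [List.length_map, PySem.List.length_pyRange_one] at hlen
  omega

-- the loop's predicate (true = the candidate is free)
def pvFree (d : PySem.Dict String String) (new_name : String) (k : Int) : Bool :=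
  !(d.contains (pvKey new_name k))

-- A's recursion computes the first free candidate in [c, c + fuel)
theorem pv_loop_eq_find (d : PySem.Dict String String) (new_name : String) (fuel : Nat) :
    ∀ c : Int, 1 ≤ c →
    pyA_loop d new_name c fuel =
      (match (PySem.List.pyRange c (c + (fuel : Int)) 1).find? (pvFree d new_name) with
       | some k => pvKey new_name k
       | none => "") := by
  induction fuel with
  | zero =>
    intro c hc
    rw [PySem.List.pyRange_one_eq_nil (by omega)]
    rfl
  | succ fuel ih =>
    intro c hc
    rw [PySem.List.pyRange_one_cons (by push_cast; omega)]
    simp only [pyA_loop, if_neg (by omega : ¬ c < 1)]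
    by_cases hcc : d.contains (new_name ++ "_" ++ PySem.Int.toStr c) = true
    · rw [List.find?_cons_of_neg (by simp [pvFree, pvKey, hcc])]
      rw [if_pos hcc, ih (c + 1) (by omega)]
      have h2 : c + 1 + (fuel : Int) = c + ((fuel : Nat) + 1 : Nat) := by push_cast; omega
      rw [h2]
    · rw [if_neg hcc, List.find?_cons_of_pos (by simp only [pvFree, pvKey]; simpa using hcc)]
      simp [pvKey]

-- a longer scan returns the same first hit when one exists in the short prefix
theorem pv_find_ext (p : Int → Bool) {c : Int} {n m : Nat} (hnm : n ≤ m)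
    (hex : ∃ k ∈ PySem.List.pyRange c (c + (n : Int)) 1, p k = true) :
    (PySem.List.pyRange c (c + (m : Int)) 1).find? p =
    (PySem.List.pyRange c (c + (n : Int)) 1).find? p := by
  rw [PySem.List.pyRange_one_append c (c + (n : Int)) (c + (m : Int)) (by omega) (by omega)]
  rw [List.find?_append]
  have hs : ((PySem.List.pyRange c (c + (n : Int)) 1).find? p).isSome := by
    rw [List.find?_isSome]
    exact hex
  rcases Option.isSome_iff_exists.mp hs with ⟨k, hk⟩
  simp [hk]

-- the set of keys tests membership exactly like the dict
theorem pv_set_contains (d : PySem.Dict String String) (s : String) :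
    (PySem.Set.ofList d.keys).contains s = d.contains s := by
  by_cases h : s ∈ d.keys
  · rw [(PySem.Dict.contains_iff_mem_keys d s).mpr h]
    simp [PySem.Set.mem_ofList, h]
  · have h1 : d.contains s = false := by
      cases hc : d.contains s with
      | false => rfl
      | true => exact absurd ((PySem.Dict.contains_iff_mem_keys d s).mp hc) h
    rw [h1]
    simp [PySem.Set.mem_ofList, h]

-- the size of the dict after the one-time rename
theorem pv_size_after (d : PySem.Dict String String) (k v : String) (name : String) :
    ((d.insert k v).erase name).size ≤ d.size + 1 := by
  have h1 : ((d.insert k v).erase name).size ≤ (d.insert k v).size := by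
    simp only [PySem.Dict.erase, PySem.Dict.size]
    exact List.length_filter_le _ _
  have h2 : (d.insert k v).size ≤ d.size + 1 := by
    by_cases hc : d.contains k = true
    · rw [PySem.Dict.size_insert]
      simp [hc]
    · rw [PySem.Dict.size_insert]
      simp at hc
      simp [hc]
  omega

-- common body: for any dict d and start c ≥ 1, A's remaining scan with enough fuel equals B's bounded scan
theorem pv_scan_eq (d : PySem.Dict String String) (new_name : String) {c : Int} (hc : 1 ≤ c)
    {fuel : Nat} (hfuel : d.size + 1 ≤ fuel) :
    pyA_loop d new_name c fuel =
      (match (PySem.List.pyRange c (c + (d.size : Int) + 1) 1).find?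
          (fun k => !((PySem.Set.ofList d.keys).contains (new_name ++ "_" ++ PySem.Int.toStr k))) with
       | some k => new_name ++ "_" ++ PySem.Int.toStr k
       | none => "") := by
  have hpred : (fun k => !((PySem.Set.ofList d.keys).contains (new_name ++ "_" ++ PySem.Int.toStr k)))
      = pvFree d new_name := by
    funext k
    simp only [pvFree, pvKey]
    rw [pv_set_contains]
  have hrange : c + ((d.size : Int)) + 1 = c + ((d.size + 1 : Nat) : Int) := by push_cast; omega
  have hex : ∃ k ∈ PySem.List.pyRange c (c + ((d.size + 1 : Nat) : Int)) 1,
      pvFree d new_name k = true := by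
    rcases pv_exists_free d new_name hc with ⟨k, hk, hfree⟩
    rw [hrange] at hk
    exact ⟨k, hk, by simp [pvFree, hfree]⟩
  rw [hpred, pv_loop_eq_find d new_name fuel c hc, hrange,
      pv_find_ext (pvFree d new_name) hfuel hex]
  cases List.find? (pvFree d new_name) (PySem.List.pyRange c (c + ((d.size + 1 : Nat) : Int)) 1) <;> rfl

-- ===== VERDICT (by name: the statement is the Claim_ definition above) =====
theorem propose_name_and_modify_dict_py_spec : Claim_equal_propose_name_and_modify_dict_py := by
  intro diction new_name counter _hdom _hpre
  unfold Spec_propose_name_and_modify_dict_py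
  unfold propose_name_and_modify_dict_py propose_name_and_modify_dict_py_alt
  set d0 := PySem.Dict.ofList diction with hd0
  by_cases hc : counter < 1
  · simp only [if_pos hc]
    by_cases hcon : d0.contains (new_name ++ "_1") = true
    · -- no rename; A spends one fuel step entering the scan at 2
      have hstep : pyA_loop d0 new_name counter (d0.size + 4)
          = pyA_loop d0 new_name 2 (d0.size + 3) := by
        show pyA_loop d0 new_name counter (d0.size + 3 + 1) = _
        simp [pyA_loop, if_pos hc, hcon]
      rw [hstep, if_pos hcon]
      exact pv_scan_eq d0 new_name (by omega) (by omega)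
    · have hstep : pyA_loop d0 new_name counter (d0.size + 4)
          = pyA_loop ((d0.insert (new_name ++ "_1") (d0.getD new_name "")).erase new_name)
              new_name 2 (d0.size + 3) := by
        show pyA_loop d0 new_name counter (d0.size + 3 + 1) = _
        simp [pyA_loop, if_pos hc, hcon]
      rw [hstep, if_neg hcon]
      set d1 := (d0.insert (new_name ++ "_1") (d0.getD new_name "")).erase new_name with hd1
      have hsz := pv_size_after d0 (new_name ++ "_1") (d0.getD new_name "") new_name
      exact pv_scan_eq d1 new_name (by omega) (by rw [hd1]; omega)
  · simp only [if_neg hc]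
    exact pv_scan_eq d0 new_name (by omega) (by omega)
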